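-- pv_equiv track=rewrite | github.com/Eddie02582/Codility | Lesson 8/Dominator.py | solution
-- ===== SOURCE A (Python) =====
-- def solution(A):
--     # write your code in Python 3.6
--     if not A:
--         return -1
--     count = {}
--     length = len(A) //2
--
--     for index,n in enumerate(A):
--         if n not in count:
--             count[n] = 1
--         else:
--             count[n] += 1
--         if count[n]  > length:
--             return  index
--     return  -1
-- ===== SOURCE B (Python) =====
-- def solution(A):
--     half = len(A) // 2
--     counts = {}
--     for n in A:
--         counts[n] = counts.get(n, 0) + 1
--     dom = None
--     for v, c in counts.items():
--         if c > half:
--             dom = v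
--             break
--     if dom is None:
--         return -1
--     c = 0
--     for i, n in enumerate(A):
--         if n == dom:
--             c += 1
--             if c > half:
--                 return i
--     return -1
-- ===== Notes on version B (the rewrite author's own statement) =====
-- stated objective: alternative
-- what changed: A fuses counting and the threshold test into one dict-carrying pass with an early return; B first builds a full tally of A, picks out the (unique) dominator whose total count exceeds len(A)//2, and only then does a targeted second scan counting just that value to find the crossing index.
import Mathlib
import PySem

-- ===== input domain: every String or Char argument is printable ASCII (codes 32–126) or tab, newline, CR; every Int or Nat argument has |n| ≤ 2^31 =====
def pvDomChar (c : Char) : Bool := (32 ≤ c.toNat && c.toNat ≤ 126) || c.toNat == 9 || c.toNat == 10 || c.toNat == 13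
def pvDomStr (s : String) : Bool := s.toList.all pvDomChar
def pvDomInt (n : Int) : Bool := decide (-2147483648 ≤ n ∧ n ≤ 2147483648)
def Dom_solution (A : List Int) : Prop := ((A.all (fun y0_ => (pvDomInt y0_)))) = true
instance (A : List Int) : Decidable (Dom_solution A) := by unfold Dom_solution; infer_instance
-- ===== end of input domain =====

-- B replaces A's fused count-and-test pass by a full tally, dominator selection, then a targeted
-- second scan for the crossing index; alternative decomposition, same O(n) cost.

-- ===== PORT A =====
-- for index,n in enumerate(A): dict update, then early return when count[n] > length
def solutionGo (length : Int) : List Int → Int → PySem.Dict Int Int → Int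
  | [], _, _ => -1
  | n :: rest, idx, d =>
    let d' := if d.contains n = false then d.insert n 1 else d.modify n 0 (· + 1)
    if d'.getD n 0 > length then idx else solutionGo length rest (idx + 1) d'

def solution (A : List Int) : Int :=
  if A.isEmpty then -1
  else solutionGo (PySem.Int.floordiv (A.length : Int) 2) A 0 PySem.Dict.empty

-- ===== PORT B =====
-- first value in the tally whose count exceeds half (the 'for v,c in counts.items(): … break' loop)
def findDomGo (half : Int) : List (Int × Int) → Option Int
  | [] => none
  | (v, c) :: rest => if c > half then some v else findDomGo half rest

-- second pass: running count of the dominator only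
def scanGo (dom half : Int) : List Int → Int → Int → Int
  | [], _, _ => -1
  | n :: rest, i, c =>
    if n == dom then
      if c + 1 > half then i else scanGo dom half rest (i + 1) (c + 1)
    else scanGo dom half rest (i + 1) c

def solution_alt (A : List Int) : Int :=
  let half := PySem.Int.floordiv (A.length : Int) 2
  let counts := A.foldl (fun d x => d.insert x (d.getD x 0 + 1)) PySem.Dict.empty
  match findDomGo half counts.items with
  | none => -1
  | some dom => scanGo dom half A 0 0

-- ===== PRECONDITION & SPEC =====
def Spec_solution (A : List Int) (out : Int) : Prop := out = solution_alt A
instance (A : List Int) (out : Int) : Decidable (Spec_solution A out) := by unfold Spec_solution; infer_instance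

-- ===== CLAIM (what is proved, stated in full; the proofs are below) =====
def Claim_equal_solution : Prop := ∀ (A : List Int), Dom_solution A → Spec_solution A (solution A)

-- ===== LEMMAS AND PROOFS =====

-- the dict update of A's loop body bumps exactly the count of n
lemma dictStep (d : PySem.Dict Int Int) (n v : Int) :
    (if d.contains n = false then d.insert n 1 else d.modify n 0 (· + 1)).getD v 0
      = d.getD v 0 + (if v = n then 1 else 0) := by
  by_cases hc : d.contains n
  · rw [if_neg (by simp [hc]), PySem.Dict.getD_modify]
    split_ifs with h
    · subst h; simp
    · simp
  · have hc' : d.contains n = false := by simpa using hc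
    rw [if_pos hc', PySem.Dict.getD_insert]
    have h0 : d.getD n 0 = 0 := PySem.Dict.getD_of_not_contains d 0 hc'
    split_ifs with h
    · subst h; omega
    · omega

lemma count_append_singleton (p : List Int) (n v : Int) :
    ((p ++ [n]).count v : Int) = (p.count v : Int) + (if v = n then 1 else 0) := by
  rw [List.count_append]
  by_cases h : v = n <;> simp [h, List.count_eq_zero]

-- with no value ever exceeding half, A's loop runs to the end and returns -1
lemma loop_none (half : Int) :
    ∀ (rest p : List Int) (d : PySem.Dict Int Int) (idx : Int),
      (∀ v, d.getD v 0 = (p.count v : Int)) →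
      (∀ v, (((p ++ rest).count v : Int) ≤ half)) →
      solutionGo half rest idx d = -1 := by
  intro rest
  induction rest with
  | nil => intro p d idx _ _; rfl
  | cons n t ih =>
    intro p d idx hinv hle
    have hd' : ∀ v, (if d.contains n = false then d.insert n 1 else d.modify n 0 (· + 1)).getD v 0
        = (p.count v : Int) + (if v = n then 1 else 0) := by
      intro v; rw [dictStep, hinv]
    have hbound : ((p ++ n :: t).count n : Int) ≤ half := hle n
    have hsplit : ((p ++ n :: t).count n : Int)
        = (p.count n : Int) + 1 + (t.count n : Int) := by
      simp [List.count_append]; ring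
    unfold solutionGo
    rw [if_neg (by rw [hd' n]; simp; omega)]
    exact ih (p ++ [n]) _ (idx + 1)
      (by intro v; rw [hd' v, count_append_singleton])
      (by intro v; have := hle v; simpa using this)

-- with a dominator dom, A's loop and B's second scan cross at the same index
lemma loop_eq_scan (half dom : Int) :
    ∀ (rest p : List Int) (d : PySem.Dict Int Int) (idx : Int),
      (∀ v, d.getD v 0 = (p.count v : Int)) →
      ((p.count dom : Int) ≤ half) →
      (∀ v, v ≠ dom → (((p ++ rest).count v : Int) ≤ half)) →
      solutionGo half rest idx d = scanGo dom half rest idx (p.count dom : Int) := by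
  intro rest
  induction rest with
  | nil => intro p d idx _ _ _; rfl
  | cons n t ih =>
    intro p d idx hinv hdom hle
    simp only [solutionGo, scanGo]
    set x : PySem.Dict Int Int :=
      (if d.contains n = false then d.insert n 1 else d.modify n 0 (· + 1)) with hxdef
    have hd' : ∀ v, x.getD v 0 = (p.count v : Int) + (if v = n then 1 else 0) := by
      intro v; rw [hxdef, dictStep, hinv]
    have hinv' : ∀ v, x.getD v 0 = (((p ++ [n]).count v : Int)) := by
      intro v; rw [hd' v, count_append_singleton]
    by_cases hn : n = dom
    · subst hn
      have hcond : x.getD n 0 = (p.count n : Int) + 1 := by rw [hd' n]; simp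
      rw [hcond, if_pos (show (n == n) = true by simp)]
      by_cases hcross : (p.count n : Int) + 1 > half
      · rw [if_pos hcross, if_pos hcross]
      · rw [if_neg hcross, if_neg hcross]
        have := ih (p ++ [n]) x (idx + 1) hinv'
          (by rw [count_append_singleton]; simp; omega)
          (by intro v hv; have := hle v hv; simpa using this)
        rw [this, count_append_singleton]; simp
    · have hbound : ((p ++ n :: t).count n : Int) ≤ half := hle n hn
      have hsplit : ((p ++ n :: t).count n : Int)
          = (p.count n : Int) + 1 + (t.count n : Int) := by
        simp [List.count_append]; ring
      have hcond : x.getD n 0 = (p.count n : Int) + 1 := by rw [hd' n]; simp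
      rw [hcond, if_neg (show ¬((p.count n : Int) + 1 > half) by omega),
        if_neg (show ¬((n == dom) = true) by simp [hn])]
      have := ih (p ++ [n]) x (idx + 1) hinv'
        (by rw [count_append_singleton]; simp [Ne.symm hn]; omega)
        (by intro v hv; have := hle v hv; simpa using this)
      rw [this, count_append_singleton]; simp [Ne.symm hn]

-- two distinct values cannot both occur more than half the time
lemma two_counts_le_length (A : List Int) (v w : Int) (h : v ≠ w) :
    A.count v + A.count w ≤ A.length := by
  induction A with
  | nil => simp
  | cons a t ih =>
    simp only [List.count_cons, List.length_cons]
    split_ifs with h1 h2 h2 <;> simp only [beq_iff_eq] at h1 h2 <;> omega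

lemma findDom_none (half : Int) (A : List Int) :
    ∀ keys : List Int, (∀ v ∈ keys, ((A.count v : Int) ≤ half)) →
      findDomGo half (keys.map fun k => (k, (A.count k : Int))) = none := by
  intro keys
  induction keys with
  | nil => intro _; rfl
  | cons k t ih =>
    intro h
    simp only [List.map_cons]
    unfold findDomGo
    rw [if_neg (by have := h k (by simp); omega)]
    exact ih (fun v hv => h v (by simp [hv]))

lemma findDom_some (half : Int) (A : List Int) (dom : Int)
    (hd : half < (A.count dom : Int)) (hu : ∀ v, v ≠ dom → (A.count v : Int) ≤ half) :
    ∀ keys : List Int, dom ∈ keys →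
      findDomGo half (keys.map fun k => (k, (A.count k : Int))) = some dom := by
  intro keys
  induction keys with
  | nil => intro h; simp at h
  | cons k t ih =>
    intro hmem
    simp only [List.map_cons]
    unfold findDomGo
    by_cases hk : k = dom
    · subst hk; rw [if_pos (by omega)]
    · rw [if_neg (by have := hu k hk; omega)]
      exact ih ((List.mem_cons.mp hmem).resolve_left (fun hh => hk hh.symm))

-- the tally loop of B is Counter(A)
lemma counts_eq_items (A : List Int) :
    (A.foldl (fun d x => d.insert x (d.getD x 0 + 1)) PySem.Dict.empty).items
      = (PySem.Set.ofList A).map (fun k => (k, (A.count k : Int))) := by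
  rw [PySem.Dict.foldl_insert_getD_add_one_eq_counter, PySem.Dict.items_counter]

-- ===== VERDICT (by name: the statement is the Claim_ definition above) =====
theorem solution_spec : Claim_equal_solution := by
  intro A _
  unfold Spec_solution solution solution_alt
  simp only [counts_eq_items]
  rcases heq : A with _ | ⟨a, t⟩
  · rfl
  rw [← heq]
  have hAne : A.isEmpty = false := by rw [heq]; rfl
  rw [if_neg (by simp [hAne])]
  set half := PySem.Int.floordiv (A.length : Int) 2 with hhalf
  have hhv : half = (A.length : Int) / 2 := by
    rw [hhalf, PySem.Int.floordiv_eq_ediv_of_pos (by omega)]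
  have hhnn : 0 ≤ half := by rw [hhv]; positivity
  by_cases hex : ∃ v, half < (A.count v : Int)
  · obtain ⟨dom, hdom⟩ := hex
    have hu : ∀ v, v ≠ dom → (A.count v : Int) ≤ half := by
      intro v hv
      by_contra hlt
      have h2 := two_counts_le_length A v dom hv
      have hl : A.count v ≤ A.length := List.count_le_length
      omega
    have hmem : dom ∈ A := by
      by_contra hm
      have : A.count dom = 0 := List.count_eq_zero.mpr hm
      omega
    rw [findDom_some half A dom hdom hu (PySem.Set.ofList A)
        ((PySem.Set.mem_ofList _ _).mpr hmem)]
    have := loop_eq_scan half dom A [] PySem.Dict.empty 0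
      (by intro v; simp [PySem.Dict.getD_empty])
      (by simpa using hhnn)
      (by intro v hv; simpa using hu v hv)
    simpa using this
  · have hex' : ∀ v, (A.count v : Int) ≤ half := fun v => by have := not_exists.mp hex v; omega
    rw [findDom_none half A (PySem.Set.ofList A) (fun v _ => hex' v)]
    exact loop_none half A [] PySem.Dict.empty 0
      (by intro v; simp [PySem.Dict.getD_empty])
      (by intro v; simpa using hex' v)
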